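-- pv_equiv track=rewrite | github.com/eejai42/semiotics-is-everything-a-language | execution-substratrates/uml/inject-into-uml.py | generate_class_diagram
-- ===== SOURCE A (Python) =====
-- from typing import List, Dict, Any, Optional, Union
--
-- def datatype_to_uml(datatype: str) -> str:
--     """Convert rulebook datatype to UML type."""
--     dt = datatype.lower()
--     if dt == 'boolean':
--         return 'Boolean'
--     elif dt == 'integer':
--         return 'Integer'
--     else:
--         return 'String'
--
-- def generate_class_diagram(tables: Dict[str, Any]) -> str:
--     """Generate PlantUML class diagram from rulebook schema."""
--     lines = ['@startuml', 'skinparam classAttributeIconSize 0', '']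
--
--     for table_name, table_def in sorted(tables.items()):
--         if table_name.startswith('_') or table_name.startswith('$'):
--             continue
--
--         schema = table_def.get('schema', [])
--         if not schema:
--             continue
--
--         lines.append(f'class {table_name} {{')
--
--         # Raw attributes
--         for col in schema:
--             if col.get('type') != 'calculated':
--                 uml_type = datatype_to_uml(col.get('datatype', 'string'))
--                 lines.append(f'  +{col["name"]}: {uml_type}')
--
--         lines.append('  --')
--
--         # Derived attributes (calculated)
--         for col in schema:
--             if col.get('type') == 'calculated':
--                 uml_type = datatype_to_uml(col.get('datatype', 'string'))
--                 lines.append(f'  /{col["name"]}: {uml_type}  {{derived}}')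
--
--         lines.append('}')
--         lines.append('')
--
--     lines.append('@enduml')
--     return '\n'.join(lines)
-- ===== SOURCE B (Python) =====
-- def datatype_to_uml(datatype: str) -> str:
--     """Convert rulebook datatype to UML type."""
--     dt = datatype.lower()
--     if dt == 'boolean':
--         return 'Boolean'
--     elif dt == 'integer':
--         return 'Integer'
--     else:
--         return 'String'
--
--
-- def generate_class_diagram(tables) -> str:
--     """Generate PlantUML class diagram from rulebook schema."""
--     def render(name, schema):
--         raws, derived = [], []
--         for col in schema:
--             t = datatype_to_uml(col.get('datatype', 'string'))
--             if col.get('type') == 'calculated':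
--                 derived.append(f'  /{col["name"]}: {t}  {{derived}}')
--             else:
--                 raws.append(f'  +{col["name"]}: {t}')
--         return [f'class {name} {{', *raws, '  --', *derived, '}', '']
--
--     header = ['@startuml', 'skinparam classAttributeIconSize 0', '']
--     body = [line
--             for name, td in sorted(tables.items())
--             if not name.startswith(('_', '$')) and td.get('schema')
--             for line in render(name, td['schema'])]
--     return '\n'.join(header + body + ['@enduml'])
-- ===== Notes on version B (the rewrite author's own statement) =====
-- stated objective: simpler
-- what changed: A threads one mutable 'lines' accumulator through the whole nested loop and scans each schema twice (once for raw, once for calculated columns); B renders each table as a self-contained block built by a single partition pass over its schema and assembles the output as header + comprehension of blocks + footer.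
import Mathlib
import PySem

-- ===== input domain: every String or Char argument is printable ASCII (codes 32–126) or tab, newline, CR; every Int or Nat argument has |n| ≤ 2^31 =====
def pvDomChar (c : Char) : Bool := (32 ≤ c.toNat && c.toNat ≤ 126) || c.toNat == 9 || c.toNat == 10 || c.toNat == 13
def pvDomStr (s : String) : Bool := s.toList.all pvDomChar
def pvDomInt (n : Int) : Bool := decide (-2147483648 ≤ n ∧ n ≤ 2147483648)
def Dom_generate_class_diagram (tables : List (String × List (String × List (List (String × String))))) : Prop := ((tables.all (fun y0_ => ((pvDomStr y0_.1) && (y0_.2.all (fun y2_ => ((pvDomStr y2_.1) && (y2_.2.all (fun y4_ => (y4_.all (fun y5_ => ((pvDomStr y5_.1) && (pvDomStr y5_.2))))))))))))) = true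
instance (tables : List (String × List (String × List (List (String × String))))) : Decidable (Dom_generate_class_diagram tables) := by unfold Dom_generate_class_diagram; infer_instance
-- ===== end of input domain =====

-- B renders each table as a self-contained block via a single partition pass over its schema and
-- concatenates header ++ blocks ++ footer, instead of A's one mutable accumulator threaded through
-- the nested loop with two scans per schema (objective: simpler). Same cost.

-- ===== PORT A =====
def datatype_to_uml (datatype : String) : String :=
  let dt := PySem.Str.lower datatype
  if dt == "boolean" then "Boolean"
  else if dt == "integer" then "Integer"
  else "String"

def generate_class_diagram (tables : List (String × List (String × List (List (String × String))))) : String :=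
  let lines : List String := ["@startuml", "skinparam classAttributeIconSize 0", ""]
  let lines := (PySem.List.sorted (PySem.Dict.ofList tables).items (fun p => p.1)).foldl
    (fun lines p =>
      if PySem.Str.startswith p.1 "_" || PySem.Str.startswith p.1 "$" then lines
      else
        let schema := (PySem.Dict.ofList p.2).getD "schema" []
        if schema == [] then lines
        else
          let lines := lines ++ ["class " ++ p.1 ++ " {"]
          -- Raw attributes
          let lines := schema.foldl
            (fun lines col =>
              if !((PySem.Dict.ofList col).get? "type" == some "calculated") then
                lines ++ ["  +" ++ (PySem.Dict.ofList col).getD "name" "" ++ ": "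
                          ++ datatype_to_uml ((PySem.Dict.ofList col).getD "datatype" "string")]
              else lines) lines
          let lines := lines ++ ["  --"]
          -- Derived attributes (calculated)
          let lines := schema.foldl
            (fun lines col =>
              if (PySem.Dict.ofList col).get? "type" == some "calculated" then
                lines ++ ["  /" ++ (PySem.Dict.ofList col).getD "name" "" ++ ": "
                          ++ datatype_to_uml ((PySem.Dict.ofList col).getD "datatype" "string") ++ "  {derived}"]
              else lines) lines
          lines ++ ["}", ""]) lines
  PySem.Str.join "\n" (lines ++ ["@enduml"])

-- ===== PORT B =====
-- Source B's nested 'render': one partition pass over the schema, then the block as a list literal.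
def renderTable (name : String) (schema : List (List (String × String))) : List String :=
  let rc := schema.foldl
    (fun (acc : List String × List String) col =>
      if (PySem.Dict.ofList col).get? "type" == some "calculated" then
        (acc.1, acc.2 ++ ["  /" ++ (PySem.Dict.ofList col).getD "name" "" ++ ": "
                          ++ datatype_to_uml ((PySem.Dict.ofList col).getD "datatype" "string") ++ "  {derived}"])
      else
        (acc.1 ++ ["  +" ++ (PySem.Dict.ofList col).getD "name" "" ++ ": "
                   ++ datatype_to_uml ((PySem.Dict.ofList col).getD "datatype" "string")], acc.2))
    ([], [])
  ["class " ++ name ++ " {"] ++ rc.1 ++ ["  --"] ++ rc.2 ++ ["}", ""]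

def generate_class_diagram_alt (tables : List (String × List (String × List (List (String × String))))) : String :=
  let header : List String := ["@startuml", "skinparam classAttributeIconSize 0", ""]
  let body := (PySem.List.sorted (PySem.Dict.ofList tables).items (fun p => p.1)).flatMap
    (fun p =>
      if PySem.Str.startswith p.1 "_" || PySem.Str.startswith p.1 "$" then []
      else if (PySem.Dict.ofList p.2).getD "schema" [] == [] then []
      else renderTable p.1 ((PySem.Dict.ofList p.2).getD "schema" []))
  PySem.Str.join "\n" (header ++ body ++ ["@enduml"])

-- ===== PRECONDITION & SPEC =====
-- Pre_ excludes exactly the inputs where Python A raises KeyError: a column dict without the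
-- "name" key inside the schema of an emitted (non-skipped, nonempty-schema) table.
def Pre_generate_class_diagram (tables : List (String × List (String × List (List (String × String))))) : Prop :=
  ∀ p ∈ (PySem.Dict.ofList tables).items,
    ¬(PySem.Str.startswith p.1 "_" = true ∨ PySem.Str.startswith p.1 "$" = true) →
    ∀ col ∈ (PySem.Dict.ofList p.2).getD "schema" ([] : List (List (String × String))),
      (PySem.Dict.ofList col).contains "name" = true
instance (tables : List (String × List (String × List (List (String × String))))) : Decidable (Pre_generate_class_diagram tables) := by unfold Pre_generate_class_diagram; infer_instance

def pvWitness_generate_class_diagram : (List (String × List (String × List (List (String × String))))) :=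
  [("Person", [("schema", [[("name", "id"), ("datatype", "integer")],
                           [("name", "label"), ("type", "calculated"), ("datatype", "string")]])]),
   ("_meta", [("schema", [[("nope", "x")]])])]

def Spec_generate_class_diagram (tables : List (String × List (String × List (List (String × String))))) (out : String) : Prop := out = generate_class_diagram_alt tables
instance (tables : List (String × List (String × List (List (String × String))))) (out : String) : Decidable (Spec_generate_class_diagram tables out) := by unfold Spec_generate_class_diagram; infer_instance

-- ===== CLAIM (what is proved, stated in full; the proofs are below) =====
def Claim_equal_generate_class_diagram : Prop := ∀ (tables : List (String × List (String × List (List (String × String))))), Dom_generate_class_diagram tables → Pre_generate_class_diagram tables → Spec_generate_class_diagram tables (generate_class_diagram tables)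

-- ===== LEMMAS AND PROOFS =====

-- one partition pass over the schema = A's two filtered passes
theorem foldl_partition {α β : Type} (p : α → Bool) (f g : α → β) (l : List α) (r c : List β) :
    l.foldl (fun acc x => if p x then (acc.1, acc.2 ++ [g x]) else (acc.1 ++ [f x], acc.2)) (r, c)
      = (r ++ ((l.filter (fun x => !(p x))).map f), c ++ ((l.filter p).map g)) := by
  induction l generalizing r c with
  | nil => simp
  | cons x t ih => by_cases h : p x <;> simp [h, ih]

-- A's whole loop = header ++ concatenation of B's per-table blocks
theorem lines_eq (tables : List (String × List (String × List (List (String × String))))) :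
    generate_class_diagram tables = generate_class_diagram_alt tables := by
  unfold generate_class_diagram generate_class_diagram_alt
  dsimp only
  rw [PySem.List.foldl_congr_mem
      (g := fun (acc : List String) p =>
        acc ++ (if PySem.Str.startswith p.1 "_" || PySem.Str.startswith p.1 "$" then []
                else if (PySem.Dict.ofList p.2).getD "schema" [] == [] then []
                else renderTable p.1 ((PySem.Dict.ofList p.2).getD "schema" [])))]
  · rw [PySem.List.foldl_append_eq_flatMap]
  · intro acc p _
    dsimp only
    by_cases h1 : (PySem.Str.startswith p.1 "_" || PySem.Str.startswith p.1 "$") = true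
    · rw [if_pos h1, if_pos h1, List.append_nil]
    · rw [if_neg h1, if_neg h1]
      by_cases h2 : ((PySem.Dict.ofList p.2).getD "schema" ([] : List (List (String × String))) == []) = true
      · rw [if_pos h2, if_pos h2, List.append_nil]
      · rw [if_neg h2, if_neg h2]
        rw [PySem.List.foldl_append_if, PySem.List.foldl_append_if, renderTable, foldl_partition]
        simp

-- ===== VERDICT (by name: the statement is the Claim_ definition above) =====
theorem generate_class_diagram_spec : Claim_equal_generate_class_diagram := by
  intro tables _ _
  exact lines_eq tables
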